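-- pv_equiv track=rewrite | github.com/kidsama/code_note | 00.b.test/test010.py | check_total_contain_2
-- ===== SOURCE A (Python) =====
-- from typing import List
--
-- def check_total_contain_2(area_paths_a: List[str], area_paths_b: List[str]) -> bool:
--     if None in area_paths_b:
--         return False
--     for path_a in area_paths_a:
--         if path_a is not None and all(
--             not path_a.startswith(f"{path_b}") for path_b in area_paths_b
--         ):
--             return False
--     return True
-- ===== SOURCE B (Python) =====
-- def check_total_contain_2(area_paths_a, area_paths_b):
--     if None in area_paths_b:
--         return False
--     prefixes = set(area_paths_b)
--     for path_a in area_paths_a: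
--         if path_a is None:
--             continue
--         if not any(path_a[:k] in prefixes for k in range(len(path_a) + 1)):
--             return False
--     return True
-- ===== Notes on version B (the rewrite author's own statement) =====
-- stated objective: alternative
-- what changed: A scans the whole area_paths_b list for each path_a (startswith against every candidate); B builds a hash set of area_paths_b once and instead tests each of the len(path_a)+1 prefixes of path_a for membership, removing the inner scan over area_paths_b.
import Mathlib
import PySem

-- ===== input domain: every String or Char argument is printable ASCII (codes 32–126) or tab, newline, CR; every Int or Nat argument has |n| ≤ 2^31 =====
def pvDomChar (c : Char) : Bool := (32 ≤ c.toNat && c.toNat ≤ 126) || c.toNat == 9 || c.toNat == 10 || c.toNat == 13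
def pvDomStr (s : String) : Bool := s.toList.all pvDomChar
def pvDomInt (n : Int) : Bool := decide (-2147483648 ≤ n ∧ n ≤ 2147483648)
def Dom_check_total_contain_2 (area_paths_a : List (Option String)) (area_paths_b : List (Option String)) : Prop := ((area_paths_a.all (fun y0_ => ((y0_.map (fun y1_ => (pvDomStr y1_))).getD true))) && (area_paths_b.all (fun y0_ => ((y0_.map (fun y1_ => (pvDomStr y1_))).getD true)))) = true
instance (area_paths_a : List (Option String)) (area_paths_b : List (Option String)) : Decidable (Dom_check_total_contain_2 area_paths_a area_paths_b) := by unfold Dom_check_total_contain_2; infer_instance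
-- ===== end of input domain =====

-- B replaces A's inner scan over area_paths_b with a hash set of area_paths_b queried
-- with every prefix of each path_a (objective: alternative; same result proved equal).

-- ===== PORT A =====
-- f"{path_b}" (str() of the element; "None" for None, unreachable after the None check)
def pvFStr (pb : Option String) : String :=
  match pb with
  | some s => s
  | none => "None"

-- the 'for path_a in area_paths_a' loop of A
def pvALoop (bs : List (Option String)) : List (Option String) → Bool
  | [] => true
  | pa :: rest =>
    if (match pa with
        | some s => bs.all (fun pb => !(PySem.Str.startswith s (pvFStr pb)))
        | none => false) then false
    else pvALoop bs rest

def check_total_contain_2 (area_paths_a : List (Option String)) (area_paths_b : List (Option String)) : Bool :=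
  if area_paths_b.contains none then false
  else pvALoop area_paths_b area_paths_a

-- ===== PORT B =====
-- the 'for path_a in area_paths_a' loop of B; prefixes = set(area_paths_b)
def pvBLoop (prefixes : PySem.Set (Option String)) : List (Option String) → Bool
  | [] => true
  | none :: rest => pvBLoop prefixes rest
  | some s :: rest =>
    if !((PySem.List.pyRange 0 ((PySem.Str.len s : Int) + 1) 1).any
          (fun k => decide ((some (PySem.Str.slice s none (some k))) ∈ prefixes))) then false
    else pvBLoop prefixes rest

def check_total_contain_2_alt (area_paths_a : List (Option String)) (area_paths_b : List (Option String)) : Bool :=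
  if area_paths_b.contains none then false
  else pvBLoop (PySem.Set.ofList area_paths_b) area_paths_a

-- ===== PRECONDITION & SPEC =====
def Spec_check_total_contain_2 (area_paths_a : List (Option String)) (area_paths_b : List (Option String)) (out : Bool) : Prop := out = check_total_contain_2_alt area_paths_a area_paths_b
instance (area_paths_a : List (Option String)) (area_paths_b : List (Option String)) (out : Bool) : Decidable (Spec_check_total_contain_2 area_paths_a area_paths_b out) := by unfold Spec_check_total_contain_2; infer_instance

-- ===== CLAIM (what is proved, stated in full; the proofs are below) =====
def Claim_equal_check_total_contain_2 : Prop := ∀ (area_paths_a : List (Option String)) (area_paths_b : List (Option String)), Dom_check_total_contain_2 area_paths_a area_paths_b → Spec_check_total_contain_2 area_paths_a area_paths_b (check_total_contain_2 area_paths_a area_paths_b)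

-- ===== LEMMAS AND PROOFS =====

-- some prefix of s lies in bs  ↔  some element of bs is a prefix of s (bs None-free)
lemma pv_any_prefix (s : String) (bs : List (Option String)) (hb : (none : Option String) ∉ bs) :
    ((PySem.List.pyRange 0 ((PySem.Str.len s : Int) + 1) 1).any
       (fun k => decide ((some (PySem.Str.slice s none (some k))) ∈ PySem.Set.ofList bs)))
    = !(bs.all (fun pb => !(PySem.Str.startswith s (pvFStr pb)))) := by
  rw [Bool.eq_iff_iff]
  simp only [List.any_eq_true, PySem.List.mem_pyRange_one, decide_eq_true_eq,
    PySem.Set.mem_ofList, Bool.not_eq_true', List.all_eq_false]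
  constructor
  · rintro ⟨k, ⟨h0, _⟩, hmem⟩
    refine ⟨some (PySem.Str.slice s none (some k)), hmem, ?_⟩
    simp only [pvFStr, Bool.not_eq_false, PySem.Str.startswith_eq, PySem.Chars.startswith_iff]
    have ht : (PySem.Str.slice s none (some k)).toList = s.toList.take k.toNat := by
      simp [PySem.Str.slice, PySem.List.slice_to _ h0]
    rw [ht]
    exact List.take_prefix _ _
  · rintro ⟨pb, hmem, hsw⟩
    cases pb with
    | none => exact absurd hmem hb
    | some p =>
      have hpre : p.toList <+: s.toList := by
        simp only [pvFStr, PySem.Str.startswith_eq, Bool.not_eq_false,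
          PySem.Chars.startswith_iff] at hsw
        exact hsw
      refine ⟨(p.toList.length : Int), ⟨by positivity, ?_⟩, ?_⟩
      · have := hpre.length_le
        have hlen : PySem.Str.len s = (s.toList.length : Int) := by simp [PySem.Str.len_eq]
        rw [hlen]
        exact_mod_cast by omega
      · have hsl : PySem.Str.slice s none (some (p.toList.length : Int)) = p := by
          rw [← String.toList_inj]
          have : (PySem.Str.slice s none (some (p.toList.length : Int))).toList
              = s.toList.take p.toList.length := by
            simp [PySem.Str.slice]
          rw [this, ← List.prefix_iff_eq_take.mp hpre]
        rw [hsl]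
        exact hmem

lemma pv_loop_eq (bs : List (Option String)) (hb : (none : Option String) ∉ bs) :
    ∀ as : List (Option String), pvALoop bs as = pvBLoop (PySem.Set.ofList bs) as := by
  intro as
  induction as with
  | nil => rfl
  | cons pa rest ih =>
    cases pa with
    | none => simpa [pvALoop, pvBLoop] using ih
    | some s =>
      simp only [pvALoop, pvBLoop, pv_any_prefix s bs hb, Bool.not_not]
      rw [ih]

-- ===== VERDICT (by name: the statement is the Claim_ definition above) =====
theorem check_total_contain_2_spec : Claim_equal_check_total_contain_2 := by
  intro as bs _
  unfold Spec_check_total_contain_2 check_total_contain_2 check_total_contain_2_alt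
  by_cases h : (none : Option String) ∈ bs
  · simp [h]
  · simp [h, pv_loop_eq bs h]
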